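-- pv_equiv track=rewrite | github.com/NigelGuyLeeming/sparc_rar | sparc17.py | count_sides_uv
-- ===== SOURCE A (Python) =====
-- def count_sides_uv(P_xyz, N_xyz, uv_uv):
--     """Count how many uv points lie on each side of the normal line."""
--     x0, y0 = P_xyz
--     dx, dy = N_xyz
--     pos = neg = zero = 0
--     for (x, y) in uv_uv:
--         side = (x - x0)*dy - (y - y0)*dx
--         if side > 0:
--             pos += 1
--         elif side < 0:
--             neg += 1
--         else:
--             zero += 1
--     return pos, neg, zero
-- ===== SOURCE B (Python) =====
-- def count_sides_uv(P_xyz, N_xyz, uv_uv):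
--     """Count how many uv points lie on each side of the normal line.
--
--     Divide-and-conquer: recursively split the point list in half, count each
--     half, and add the (pos, neg, zero) triples; correct because the counts are
--     additive over any partition of the list.
--     """
--     x0, y0 = P_xyz
--     dx, dy = N_xyz
--
--     def go(pts):
--         n = len(pts)
--         if n == 0:
--             return (0, 0, 0)
--         if n == 1:
--             x, y = pts[0]
--             s = (x - x0)*dy - (y - y0)*dx
--             return (int(s > 0), int(s < 0), int(s == 0))
--         mid = n // 2
--         p1, n1, z1 = go(pts[:mid])
--         p2, n2, z2 = go(pts[mid:])
--         return (p1 + p2, n1 + n2, z1 + z2)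
--
--     return go(uv_uv)
-- ===== Notes on version B (the rewrite author's own statement) =====
-- stated objective: alternative
-- what changed: B replaces A's single iterative loop with three accumulators by a divide-and-conquer recursion that splits the point list in half, counts each half, and adds the resulting (pos, neg, zero) triples.
import Mathlib
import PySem

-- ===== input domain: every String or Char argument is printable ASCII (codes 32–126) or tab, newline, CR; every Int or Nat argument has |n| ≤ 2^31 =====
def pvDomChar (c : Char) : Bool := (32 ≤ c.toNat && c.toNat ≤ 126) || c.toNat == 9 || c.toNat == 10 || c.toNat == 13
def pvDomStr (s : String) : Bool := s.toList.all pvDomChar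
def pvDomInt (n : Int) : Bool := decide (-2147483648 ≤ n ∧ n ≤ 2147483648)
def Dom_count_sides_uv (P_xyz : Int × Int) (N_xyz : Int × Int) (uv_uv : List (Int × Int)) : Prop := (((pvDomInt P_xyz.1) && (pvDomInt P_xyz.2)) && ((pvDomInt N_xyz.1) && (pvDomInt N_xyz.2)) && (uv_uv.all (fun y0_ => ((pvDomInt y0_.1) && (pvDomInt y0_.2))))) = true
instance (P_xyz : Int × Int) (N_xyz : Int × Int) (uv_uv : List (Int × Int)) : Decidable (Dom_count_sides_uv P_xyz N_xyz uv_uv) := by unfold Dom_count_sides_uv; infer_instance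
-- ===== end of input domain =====

-- B replaces A's single fused loop by a divide-and-conquer recursion on halves of the list.
-- ===== PORT A =====
def count_sides_uv (P_xyz : Int × Int) (N_xyz : Int × Int) (uv_uv : List (Int × Int)) : Int × Int × Int :=
  let x0 := P_xyz.1; let y0 := P_xyz.2
  let dx := N_xyz.1; let dy := N_xyz.2
  uv_uv.foldl (fun (acc : Int × Int × Int) p =>
    let side := (p.1 - x0)*dy - (p.2 - y0)*dx
    if side > 0 then (acc.1 + 1, acc.2.1, acc.2.2)
    else if side < 0 then (acc.1, acc.2.1 + 1, acc.2.2)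
    else (acc.1, acc.2.1, acc.2.2 + 1)) (0, 0, 0)

-- ===== PORT B =====
-- helper: the recursive `go` of Source B (split in half, count each half, add triples)
def csuGo (x0 y0 dx dy : Int) (pts : List (Int × Int)) : Int × Int × Int :=
    if h0 : pts.length = 0 then (0, 0, 0)
    else if h1 : pts.length = 1 then
      match pts with
      | [] => (0, 0, 0)
      | p :: _ =>
        let s := (p.1 - x0)*dy - (p.2 - y0)*dx
        ((if s > 0 then 1 else 0), (if s < 0 then 1 else 0), (if s = 0 then 1 else 0))
    else
      let mid := pts.length / 2
      let r1 := csuGo x0 y0 dx dy (pts.take mid)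
      let r2 := csuGo x0 y0 dx dy (pts.drop mid)
      (r1.1 + r2.1, r1.2.1 + r2.2.1, r1.2.2 + r2.2.2)
  termination_by pts.length
  decreasing_by
    all_goals simp only [List.length_take, List.length_drop]
    all_goals omega

def count_sides_uv_alt (P_xyz : Int × Int) (N_xyz : Int × Int) (uv_uv : List (Int × Int)) : Int × Int × Int :=
  let x0 := P_xyz.1; let y0 := P_xyz.2
  let dx := N_xyz.1; let dy := N_xyz.2
  csuGo x0 y0 dx dy uv_uv

-- ===== PRECONDITION & SPEC =====
def Spec_count_sides_uv (P_xyz : Int × Int) (N_xyz : Int × Int) (uv_uv : List (Int × Int)) (out : Int × Int × Int) : Prop := out = count_sides_uv_alt P_xyz N_xyz uv_uv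
instance (P_xyz : Int × Int) (N_xyz : Int × Int) (uv_uv : List (Int × Int)) (out : Int × Int × Int) : Decidable (Spec_count_sides_uv P_xyz N_xyz uv_uv out) := by unfold Spec_count_sides_uv; infer_instance

-- ===== CLAIM =====
def Claim_equal_count_sides_uv : Prop := ∀ (P_xyz : Int × Int) (N_xyz : Int × Int) (uv_uv : List (Int × Int)), Dom_count_sides_uv P_xyz N_xyz uv_uv → Spec_count_sides_uv P_xyz N_xyz uv_uv (count_sides_uv P_xyz N_xyz uv_uv)

-- ===== LEMMAS AND PROOFS =====

-- the common specification: the three sign counts, as Ints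
def csuCnt (x0 y0 dx dy : Int) (l : List (Int × Int)) : Int × Int × Int :=
  ((l.countP (fun p => decide ((p.1 - x0)*dy - (p.2 - y0)*dx > 0)) : Int),
   (l.countP (fun p => decide ((p.1 - x0)*dy - (p.2 - y0)*dx < 0)) : Int),
   (l.countP (fun p => decide ((p.1 - x0)*dy - (p.2 - y0)*dx = 0)) : Int))

lemma csuGo_eq_cnt (x0 y0 dx dy : Int) (l : List (Int × Int)) :
    csuGo x0 y0 dx dy l = csuCnt x0 y0 dx dy l := by
  induction hn : l.length using Nat.strong_induction_on generalizing l with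
  | _ n ih =>
    rw [csuGo]
    by_cases h0 : l.length = 0
    · have : l = [] := List.length_eq_zero_iff.mp h0
      subst this; simp [csuCnt]
    · by_cases h1 : l.length = 1
      · match l with
        | [p] =>
          simp only [h1, dif_pos, csuCnt, List.countP_cons, List.countP_nil]
          by_cases hp : (p.1 - x0)*dy - (p.2 - y0)*dx > 0 <;>
          by_cases hq : (p.1 - x0)*dy - (p.2 - y0)*dx < 0 <;>
          by_cases hz : (p.1 - x0)*dy - (p.2 - y0)*dx = 0 <;>
          simp_all <;> omega
      · simp only [h0, h1, dif_neg, not_false_iff]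
        have hm1 : (l.take (l.length / 2)).length < n := by
          simp only [List.length_take]; omega
        have hm2 : (l.drop (l.length / 2)).length < n := by
          simp only [List.length_drop]; omega
        rw [ih _ hm1 _ rfl, ih _ hm2 _ rfl]
        have hsplit := List.take_append_drop (l.length / 2) l
        simp only [csuCnt, Prod.mk.injEq]
        refine ⟨?_, ?_, ?_⟩ <;> rw [← Nat.cast_add, ← List.countP_append, hsplit]

lemma csu_fold (x0 y0 dx dy : Int) (l : List (Int × Int)) (a b c : Int) :
    l.foldl (fun (acc : Int × Int × Int) p =>
      let side := (p.1 - x0)*dy - (p.2 - y0)*dx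
      if side > 0 then (acc.1 + 1, acc.2.1, acc.2.2)
      else if side < 0 then (acc.1, acc.2.1 + 1, acc.2.2)
      else (acc.1, acc.2.1, acc.2.2 + 1)) (a, b, c) =
    (a + (csuCnt x0 y0 dx dy l).1, b + (csuCnt x0 y0 dx dy l).2.1, c + (csuCnt x0 y0 dx dy l).2.2) := by
  induction l generalizing a b c with
  | nil => simp [csuCnt]
  | cons h t ih =>
    simp only [List.foldl_cons, csuCnt, List.countP_cons]
    by_cases h1 : (h.1 - x0)*dy - (h.2 - y0)*dx > 0
    · have h2 : ¬ ((h.1 - x0)*dy - (h.2 - y0)*dx < 0) := by omega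
      have h3 : ¬ ((h.1 - x0)*dy - (h.2 - y0)*dx = 0) := by omega
      simp only [h1, if_pos]
      rw [ih]
      simp [csuCnt, h2, h3]
      omega
    · by_cases h2 : (h.1 - x0)*dy - (h.2 - y0)*dx < 0
      · have h3 : ¬ ((h.1 - x0)*dy - (h.2 - y0)*dx = 0) := by omega
        simp only [h1, h2, if_neg, if_pos, not_false_iff]
        rw [ih]
        simp [csuCnt, h3]
        omega
      · have h3 : (h.1 - x0)*dy - (h.2 - y0)*dx = 0 := by omega
        simp only [h1, h2, if_neg, not_false_iff]
        rw [ih]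
        simp [csuCnt, h3]
        omega

-- ===== VERDICT =====
theorem count_sides_uv_spec : Claim_equal_count_sides_uv := by
  intro P N l _
  show count_sides_uv P N l = count_sides_uv_alt P N l
  simp only [count_sides_uv, count_sides_uv_alt]
  rw [csu_fold, csuGo_eq_cnt]
  simp
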